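-- pv_equiv track=rewrite | github.com/Mbaldek/RotaryEventManagement | scripts/sync_from_airtable.py | first_name
-- ===== SOURCE A (Python) =====
-- def first_name(full):
--     """Extract a likely first name from a free-form contact field."""
--     if not full: return ""
--     s = full.strip()
--     # Drop anything after ' - ' or ' | ' (e.g., "Martin - CEO Hormur")
--     for sep in [" - ", " – ", " | ", ","]:
--         if sep in s:
--             s = s.split(sep, 1)[0].strip()
--     # Take first token as prenom (heuristic; ambiguous for compound names but good enough)
--     parts = s.split()
--     return parts[0] if parts else ""
-- ===== SOURCE B (Python) =====
-- def first_name(full):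
--     """Extract a likely first name from a free-form contact field."""
--     # Single left-to-right scan: skip leading whitespace, then collect characters
--     # until whitespace or a comma.  The space-flanked separators (' - ', ' | ', ' - ')
--     # contain a space, so they can never cut inside the first whitespace token.
--     if not full:
--         return ""
--     rest = full.lstrip()
--     out = []
--     for ch in rest:
--         if ch.isspace() or ch == ',':
--             break
--         out.append(ch)
--     return ''.join(out)
-- ===== Notes on version B (the rewrite author's own statement) =====
-- stated objective: simpler
-- what changed: Replaces strip + the four-separator split-and-restrip loop + whitespace re-split by a single left-to-right character scan (skip leading whitespace, then take characters until whitespace or a comma), justified by the fact that the space-flanked separators can never cut inside the first whitespace token.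
import Mathlib
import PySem

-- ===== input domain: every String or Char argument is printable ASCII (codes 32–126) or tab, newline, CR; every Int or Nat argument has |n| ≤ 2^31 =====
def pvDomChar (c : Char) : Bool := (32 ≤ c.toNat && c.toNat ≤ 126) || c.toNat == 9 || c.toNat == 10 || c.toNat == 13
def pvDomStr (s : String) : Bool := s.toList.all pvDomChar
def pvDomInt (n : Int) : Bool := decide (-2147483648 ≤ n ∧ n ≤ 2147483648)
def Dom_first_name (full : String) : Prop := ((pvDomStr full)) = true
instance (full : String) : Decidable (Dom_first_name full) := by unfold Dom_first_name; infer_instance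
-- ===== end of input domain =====

-- B replaces A's strip + four-separator split-and-restrip loop + final whitespace split by a
-- single left-to-right scan (skip leading whitespace, then take characters until whitespace or
-- a comma); objective: simpler (no speed claim).

-- ===== PORT A =====
def first_name (full : String) : String :=
  if full = "" then ""
  else
    let s := PySem.Chars.strip full.toList
    let s := [(" - ").toList, (" – ").toList, (" | ").toList, (",").toList].foldl
      (fun s sep =>
        if PySem.Chars.isIn sep s then
          PySem.Chars.strip ((PySem.Chars.splitOnMax s sep 1).headD [])
        else s) s
    match PySem.Chars.split₀ s with
    | [] => ""
    | t :: _ => String.mk t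

-- ===== PORT B =====
-- B's loop: 'for ch in rest: if ch.isspace() or ch == ",": break; out.append(ch)'
def fnAltLoop : List Char → List Char
  | [] => []
  | c :: rest => if PySem.Chars.isspace c || c == ',' then [] else c :: fnAltLoop rest

def first_name_alt (full : String) : String :=
  if full = "" then ""
  else String.mk (fnAltLoop (PySem.Chars.lstrip full.toList))

-- ===== PRECONDITION & SPEC =====
def Spec_first_name (full : String) (out : String) : Prop := out = first_name_alt full
instance (full : String) (out : String) : Decidable (Spec_first_name full out) := by unfold Spec_first_name; infer_instance

-- ===== CLAIM (what is proved, stated in full; the proofs are below) =====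
def Claim_equal_first_name : Prop := ∀ (full : String), Dom_first_name full → Spec_first_name full (first_name full)

-- ===== LEMMAS AND PROOFS =====

-- the character predicate B's loop takes while: not whitespace and not a comma
def fnTok (c : Char) : Bool := !(PySem.Chars.isspace c || c == ',')

theorem fnAltLoop_eq_takeWhile (l : List Char) : fnAltLoop l = l.takeWhile fnTok := by
  induction l with
  | nil => rfl
  | cons c rest ih =>
    by_cases h : (PySem.Chars.isspace c || c == ',') = true
    · simp [fnAltLoop, List.takeWhile, h, fnTok]
    · simp [fnAltLoop, List.takeWhile, h, fnTok, ih]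

-- the prefix of l strictly before the first occurrence of sep (all of l if none)
def myCut (sep : List Char) : List Char → List Char
  | [] => []
  | c :: rest => if sep.isPrefixOf (c :: rest) then [] else c :: myCut sep rest

theorem go_m0 (sep : List Char) (fuel : Nat) (l cur : List Char) (acc : List (List Char)) :
    PySem.Chars.splitOnMax.go sep fuel 0 l cur acc = ((cur.reverse ++ l) :: acc).reverse := by
  cases fuel with
  | zero => rw [PySem.Chars.splitOnMax.go]
  | succ f => cases l with
    | nil => rw [PySem.Chars.splitOnMax.go]; simp; omega
    | cons c rest => rw [PySem.Chars.splitOnMax.go]; simp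

theorem goHead (sep : List Char) (fuel : Nat) (l cur : List Char) (h : l.length < fuel) :
    (PySem.Chars.splitOnMax.go sep fuel 1 l cur []).headD [] = cur.reverse ++ myCut sep l := by
  induction fuel generalizing l cur with
  | zero => omega
  | succ f ih =>
    cases l with
    | nil => rw [PySem.Chars.splitOnMax.go]; simp [myCut]; omega
    | cons c rest =>
      rw [PySem.Chars.splitOnMax.go]
      simp only [myCut, one_ne_zero, if_false]
      by_cases hp : sep.isPrefixOf (c :: rest) = true
      · simp only [hp, if_true]
        rw [go_m0]
        simp
      · simp only [hp, Bool.false_eq_true, if_false]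
        rw [ih rest (c :: cur) (by simpa using Nat.lt_of_succ_lt_succ h)]
        simp
-- head of s.split(sep, 1) is the prefix before the first occurrence of sep
theorem headPiece (sep s : List Char) :
    ((PySem.Chars.splitOnMax s sep 1).headD []) = myCut sep s := by
  unfold PySem.Chars.splitOnMax
  rw [if_neg (by norm_num)]
  simpa using goHead sep (s.length + 1) s [] (by omega)

theorem takeWhile_myCut (c0 : Char) (sep' l : List Char) (h : (PySem.Chars.isspace c0 || c0 == ',') = true) :
    (myCut (c0 :: sep') l).takeWhile fnTok = l.takeWhile fnTok := by
  induction l with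
  | nil => rfl
  | cons c rest ih =>
    by_cases hp : (c0 :: sep').isPrefixOf (c :: rest) = true
    · have hc : c0 = c := by
        simp only [List.isPrefixOf] at hp
        exact (beq_iff_eq.mp (Bool.and_elim_left hp))
      simp only [myCut, hp, if_true]
      have : fnTok c = false := by simp [fnTok, ← hc, h]
      simp [List.takeWhile, this]
    · simp only [myCut, hp, if_false]
      by_cases ht : fnTok c = true <;> simp [List.takeWhile, ht, ih]

theorem myCut_comma_free (l : List Char) : ',' ∉ myCut [','] l := by
  induction l with
  | nil => simp [myCut]
  | cons c rest ih =>
    by_cases hp : [','].isPrefixOf (c :: rest) = true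
    · simp [myCut, hp]
    · have hc : c ≠ ',' := by
        intro hc; subst hc
        simp [List.isPrefixOf] at hp
      simp only [myCut, hp, if_false]
      intro hmem
      rcases List.mem_cons.mp hmem with h | h
      · exact hc h.symm
      · exact ih h

-- strip decomposition and membership
theorem rstrip_decomp (u : List Char) :
    u = PySem.Chars.rstrip u ++ (u.reverse.takeWhile PySem.Chars.isspace).reverse := by
  unfold PySem.Chars.rstrip
  rw [← List.reverse_append, List.takeWhile_append_dropWhile, List.reverse_reverse]

theorem mem_rstrip_ws (u : List Char) (x : Char)
    (hx : x ∈ (u.reverse.takeWhile PySem.Chars.isspace).reverse) : PySem.Chars.isspace x = true := by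
  rw [List.mem_reverse] at hx
  exact List.mem_takeWhile_imp hx

-- takeWhile fnTok ignores a trailing all-whitespace suffix
theorem takeWhile_rstrip (u : List Char) :
    (PySem.Chars.rstrip u).takeWhile fnTok = u.takeWhile fnTok := by
  conv_rhs => rw [rstrip_decomp u]
  rw [List.takeWhile_append]
  by_cases h : ((PySem.Chars.rstrip u).takeWhile fnTok).length = (PySem.Chars.rstrip u).length
  · rw [if_pos h]
    have hself : (PySem.Chars.rstrip u).takeWhile fnTok = PySem.Chars.rstrip u :=
      (List.takeWhile_prefix fnTok).eq_of_length h
    have htake : ((u.reverse.takeWhile PySem.Chars.isspace).reverse).takeWhile fnTok = [] := by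
      cases hw : (u.reverse.takeWhile PySem.Chars.isspace).reverse with
      | nil => rfl
      | cons a t =>
        have ha : PySem.Chars.isspace a = true := mem_rstrip_ws u a (by rw [hw]; simp)
        have hf : fnTok a = false := by simp [fnTok, ha]
        simp [List.takeWhile, hf]
    rw [htake, List.append_nil, hself]
  · rw [if_neg h]

theorem rstrip_prefix (v : List Char) : PySem.Chars.rstrip v <+: v := by
  unfold PySem.Chars.rstrip
  conv_rhs => rw [← v.reverse_reverse]
  exact List.reverse_prefix.mpr (List.dropWhile_suffix _)

theorem lstrip_head (v : List Char) (hv : PySem.Chars.lstrip v = v) :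
    v = [] ∨ ∃ c rest, v = c :: rest ∧ PySem.Chars.isspace c = false := by
  cases v with
  | nil => exact Or.inl rfl
  | cons c rest =>
    right
    refine ⟨c, rest, rfl, ?_⟩
    by_contra h
    have hc : PySem.Chars.isspace c = true := by revert h; cases PySem.Chars.isspace c <;> simp
    unfold PySem.Chars.lstrip at hv
    rw [List.dropWhile_cons_of_pos hc] at hv
    have := congrArg List.length hv
    simp at this
    have := List.length_dropWhile_le (p := PySem.Chars.isspace) (l := rest)
    omega

theorem lstrip_rstrip (v : List Char) (hv : PySem.Chars.lstrip v = v) :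
    PySem.Chars.lstrip (PySem.Chars.rstrip v) = PySem.Chars.rstrip v := by
  rcases lstrip_head v hv with h | ⟨c, rest, hcons, hc⟩
  · subst h; rfl
  · cases hr : PySem.Chars.rstrip v with
    | nil => rfl
    | cons a t =>
      have hpref : PySem.Chars.rstrip v <+: v := rstrip_prefix v
      have : a = c := by
        rcases hpref with ⟨w, hw⟩
        rw [hr, hcons] at hw
        exact (List.cons_eq_cons.mp hw).1
      subst this
      unfold PySem.Chars.lstrip
      rw [List.dropWhile_cons_of_neg (by simp [hc])]

theorem lstrip_idem (u : List Char) : PySem.Chars.lstrip (PySem.Chars.lstrip u) = PySem.Chars.lstrip u := by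
  induction u with
  | nil => rfl
  | cons c rest ih =>
    unfold PySem.Chars.lstrip
    by_cases h : PySem.Chars.isspace c = true
    · rw [List.dropWhile_cons_of_pos h]
      exact ih
    · have hb : ¬ PySem.Chars.isspace c = true := by simp [h]
      rw [List.dropWhile_cons_of_neg hb, List.dropWhile_cons_of_neg hb]

theorem lstrip_strip (u : List Char) :
    PySem.Chars.lstrip (PySem.Chars.strip u) = PySem.Chars.strip u := by
  unfold PySem.Chars.strip
  exact lstrip_rstrip _ (lstrip_idem u)

theorem takeWhile_strip (v : List Char) (hv : PySem.Chars.lstrip v = v) :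
    (PySem.Chars.strip v).takeWhile fnTok = v.takeWhile fnTok := by
  unfold PySem.Chars.strip
  rw [hv]
  exact takeWhile_rstrip v

-- A's whitespace split: the head of split₀ is the first whitespace-token
theorem split0_go_acc (l cur : List Char) (acc : List (List Char)) :
    PySem.Chars.split₀.go l cur acc = acc.reverse ++ PySem.Chars.split₀.go l cur [] := by
  induction l generalizing cur acc with
  | nil => rw [PySem.Chars.split₀.go, PySem.Chars.split₀.go]; split <;> simp
  | cons c rest ih =>
    rw [PySem.Chars.split₀.go]
    conv_rhs => rw [PySem.Chars.split₀.go]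
    by_cases h : PySem.Chars.isspace c
    · simp only [h, if_true]
      by_cases hc : cur.isEmpty = true
      · simp only [hc, if_true]
        exact ih _ _
      · simp only [hc, if_false]
        rw [ih [] (cur.reverse :: acc), ih [] [cur.reverse]]
        simp
    · simp only [h, Bool.false_eq_true, if_false]
      exact ih _ _

theorem split0_go_head_ne (l cur : List Char) (hcur : cur ≠ []) :
    (PySem.Chars.split₀.go l cur []).headD [] = cur.reverse ++ l.takeWhile (fun c => !PySem.Chars.isspace c) := by
  induction l generalizing cur with
  | nil =>
    rw [PySem.Chars.split₀.go]
    rw [if_neg (by simpa using hcur)]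
    simp
  | cons c rest ih =>
    rw [PySem.Chars.split₀.go]
    by_cases h : PySem.Chars.isspace c
    · simp only [h, if_true]
      rw [if_neg (by simpa using hcur)]
      rw [split0_go_acc]
      simp [List.takeWhile, h]
    · simp only [h, Bool.false_eq_true, if_false]
      rw [ih (c :: cur) (by simp)]
      simp [List.takeWhile, h]

theorem split0_head (s : List Char) :
    (PySem.Chars.split₀ s).headD [] = (PySem.Chars.lstrip s).takeWhile (fun c => !PySem.Chars.isspace c) := by
  unfold PySem.Chars.split₀ PySem.Chars.lstrip
  induction s with
  | nil => rfl
  | cons c rest ih =>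
    rw [PySem.Chars.split₀.go]
    by_cases h : PySem.Chars.isspace c
    · simp only [h, if_true, List.isEmpty_nil, if_true]
      rw [List.dropWhile_cons_of_pos h]
      exact ih
    · simp only [h, Bool.false_eq_true, if_false]
      rw [split0_go_head_ne rest [c] (by simp), List.dropWhile_cons_of_neg (by simp [h])]
      simp [List.takeWhile, h]

theorem takeWhile_comma_free (u : List Char) (h : ',' ∉ u) :
    u.takeWhile (fun c => !PySem.Chars.isspace c) = u.takeWhile fnTok := by
  induction u with
  | nil => rfl
  | cons c rest ih =>
    have hc : c ≠ ',' := fun hcc => h (by simp [hcc])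
    have hrest : ',' ∉ rest := fun hr => h (by simp [hr])
    by_cases hw : PySem.Chars.isspace c = true
    · simp [List.takeWhile, hw, fnTok]
    · have hf : fnTok c = true := by
        simp [fnTok, hw]
        exact hc
      simp [List.takeWhile, hw, hf, ih hrest]

-- membership survives strip
theorem mem_of_mem_strip (u : List Char) (x : Char) (hx : x ∈ PySem.Chars.strip u) : x ∈ u := by
  unfold PySem.Chars.strip at hx
  have h1 : x ∈ PySem.Chars.lstrip u := by
    exact (rstrip_prefix (PySem.Chars.lstrip u)).sublist.mem hx
  exact (List.dropWhile_suffix _).sublist.mem h1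

-- one separator stage of A's loop preserves strippedness and the fnTok-prefix
theorem stage (c0 : Char) (sep' s : List Char) (hc0 : (PySem.Chars.isspace c0 || c0 == ',') = true)
    (hs : PySem.Chars.lstrip s = s) :
    PySem.Chars.lstrip (if PySem.Chars.isIn (c0 :: sep') s then
        PySem.Chars.strip ((PySem.Chars.splitOnMax s (c0 :: sep') 1).headD []) else s) =
      (if PySem.Chars.isIn (c0 :: sep') s then
        PySem.Chars.strip ((PySem.Chars.splitOnMax s (c0 :: sep') 1).headD []) else s) ∧
    (if PySem.Chars.isIn (c0 :: sep') s then
        PySem.Chars.strip ((PySem.Chars.splitOnMax s (c0 :: sep') 1).headD []) else s).takeWhile fnTok =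
      s.takeWhile fnTok := by
  by_cases hin : PySem.Chars.isIn (c0 :: sep') s = true
  · rw [if_pos hin]
    constructor
    · exact lstrip_strip _
    · rw [headPiece]
      have hcut : PySem.Chars.lstrip (myCut (c0 :: sep') s) = myCut (c0 :: sep') s := by
        rcases lstrip_head s hs with h | ⟨c, rest, hcons, hns⟩
        · subst h; rfl
        · subst hcons
          unfold myCut
          by_cases hp : (c0 :: sep').isPrefixOf (c :: rest) = true
          · rw [if_pos hp]; rfl
          · rw [if_neg hp]
            unfold PySem.Chars.lstrip
            rw [List.dropWhile_cons_of_neg (by simp [hns])]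
      rw [takeWhile_strip _ hcut]
      exact takeWhile_myCut c0 sep' s hc0
  · rw [if_neg hin]
    exact ⟨hs, rfl⟩

-- the comma stage additionally leaves a comma-free string
theorem comma_stage_free (s : List Char) :
    ',' ∉ (if PySem.Chars.isIn [','] s then
        PySem.Chars.strip ((PySem.Chars.splitOnMax s [','] 1).headD []) else s) := by
  by_cases hin : PySem.Chars.isIn [','] s = true
  · rw [if_pos hin, headPiece]
    intro hmem
    exact myCut_comma_free s (mem_of_mem_strip _ _ hmem)
  · rw [if_neg hin]
    intro hmem
    have : PySem.Chars.isIn [','] s = true := by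
      rw [PySem.Chars.isIn_iff_infix]
      rcases List.append_of_mem hmem with ⟨t1, t2, ht⟩
      exact ⟨t1, t2, by rw [ht]; simp⟩
    exact hin this

-- ===== VERDICT (by name: the statement is the Claim_ definition above) =====
theorem first_name_spec : Claim_equal_first_name := by
  intro full _
  unfold Spec_first_name first_name first_name_alt
  by_cases hfull : full = ""
  · rw [if_pos hfull, if_pos hfull]
  · rw [if_neg hfull, if_neg hfull]
    set l := full.toList with hl
    set s0 := PySem.Chars.strip l with hs0
    have hs0s : PySem.Chars.lstrip s0 = s0 := lstrip_strip l
    simp only [List.foldl]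
    rw [show (" - " : String).toList = ' ' :: ['-', ' '] from by decide,
        show (" – " : String).toList = ' ' :: ['–', ' '] from by decide,
        show (" | " : String).toList = ' ' :: ['|', ' '] from by decide,
        show ("," : String).toList = ',' :: [] from by decide]
    -- the three space-flanked separator stages
    obtain ⟨h1s, h1t⟩ := stage ' ' ['-', ' '] s0 (by decide) hs0s
    set s1 := (if PySem.Chars.isIn (' ' :: ['-', ' ']) s0 then
      PySem.Chars.strip ((PySem.Chars.splitOnMax s0 (' ' :: ['-', ' ']) 1).headD []) else s0) with hs1
    obtain ⟨h2s, h2t⟩ := stage ' ' ['–', ' '] s1 (by decide) h1s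
    set s2 := (if PySem.Chars.isIn (' ' :: ['–', ' ']) s1 then
      PySem.Chars.strip ((PySem.Chars.splitOnMax s1 (' ' :: ['–', ' ']) 1).headD []) else s1) with hs2
    obtain ⟨h3s, h3t⟩ := stage ' ' ['|', ' '] s2 (by decide) h2s
    set s3 := (if PySem.Chars.isIn (' ' :: ['|', ' ']) s2 then
      PySem.Chars.strip ((PySem.Chars.splitOnMax s2 (' ' :: ['|', ' ']) 1).headD []) else s2) with hs3
    obtain ⟨h4s, h4t⟩ := stage ',' [] s3 (by decide) h3s
    set s4 := (if PySem.Chars.isIn [','] s3 then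
      PySem.Chars.strip ((PySem.Chars.splitOnMax s3 [','] 1).headD []) else s3) with hs4
    have hfree : ',' ∉ s4 := comma_stage_free s3
    -- A's result is the head of split₀ s4
    have hA : (match PySem.Chars.split₀ s4 with
        | [] => ""
        | t :: _ => String.mk t) = String.mk ((PySem.Chars.split₀ s4).headD []) := by
      cases PySem.Chars.split₀ s4 with
      | nil => rfl
      | cons t ts => rfl
    rw [hA, split0_head s4, h4s, takeWhile_comma_free s4 hfree, h4t, h3t, h2t, h1t,
      fnAltLoop_eq_takeWhile]
    have : s0.takeWhile fnTok = (PySem.Chars.lstrip l).takeWhile fnTok := by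
      rw [hs0]
      unfold PySem.Chars.strip
      exact takeWhile_rstrip _
    rw [this]
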